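-- pv_equiv track=rewrite | github.com/zbubb/fitness-progress | fitnessApp.py | makePictureDict
-- ===== SOURCE A (Python) =====
-- def makePictureDict(picList):
--   picDict = {}
--   for pic in picList:
--     if pic['date'] in picDict:
--       picDict[pic['date']][pic['angle']] = pic
--     else:
--       picDict[pic['date']] = {}
--       picDict[pic['date']]['front'] = {}
--       picDict[pic['date']]['back'] = {}
--       picDict[pic['date']]['side'] = {}
--       picDict[pic['date']][pic['angle']] = pic
--
--   return picDict
-- ===== SOURCE B (Python) =====
-- def makeInnerDict(picList, date):
--   inner = {'front': {}, 'back': {}, 'side': {}}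
--   for pic in picList:
--     if pic['date'] == date:
--       inner[pic['angle']] = pic
--   return inner
--
-- def makePictureDict(picList):
--   picList = list(picList)
--   dates = []
--   for pic in picList:
--     if pic['date'] not in dates:
--       dates.append(pic['date'])
--   return {date: makeInnerDict(picList, date) for date in dates}
-- ===== Notes on version B (the rewrite author's own statement) =====
-- stated objective: alternative
-- what changed: A's single incremental dict-building loop is replaced by a group-by scheme: first collect the distinct dates in order of first appearance, then for each date build its inner dict independently by a filtered scan over the whole list, assembled with a dict comprehension.
import Mathlib
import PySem

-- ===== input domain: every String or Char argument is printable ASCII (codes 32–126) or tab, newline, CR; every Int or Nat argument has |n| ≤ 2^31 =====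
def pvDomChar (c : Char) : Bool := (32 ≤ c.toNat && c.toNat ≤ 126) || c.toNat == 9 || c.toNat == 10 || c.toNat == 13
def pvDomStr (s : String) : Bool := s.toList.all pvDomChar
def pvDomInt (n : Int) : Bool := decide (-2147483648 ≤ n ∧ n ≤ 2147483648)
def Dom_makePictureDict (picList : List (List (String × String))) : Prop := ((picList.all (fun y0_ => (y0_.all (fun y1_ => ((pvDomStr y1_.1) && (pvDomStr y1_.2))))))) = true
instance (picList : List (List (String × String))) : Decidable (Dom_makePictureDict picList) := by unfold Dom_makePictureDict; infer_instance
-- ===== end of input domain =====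

-- B replaces A's single incremental loop by a group-by decomposition: collect the distinct dates, then build each date's inner dict by its own filtered scan; alternative, same result.


-- ===== PORT A =====
-- pic['date'] / pic['angle'] on the pic dict (assoc list, first match); default "" is only
-- reachable outside Pre_ (where Python raises KeyError).
def pvKey (pic : List (String × String)) (k : String) : String :=
  (PySem.Dict.mk pic).getD k ""

-- one iteration of A's loop body
def pvStepA (d : PySem.Dict String (PySem.Dict String (List (String × String))))
    (pic : List (String × String)) : PySem.Dict String (PySem.Dict String (List (String × String))) :=
  let date := pvKey pic "date"
  let angle := pvKey pic "angle"
  if d.contains date then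
    d.modify date PySem.Dict.empty (fun inner => inner.insert angle pic)
  else
    let d1 := d.insert date PySem.Dict.empty
    let d2 := d1.modify date PySem.Dict.empty (fun inner => inner.insert "front" [])
    let d3 := d2.modify date PySem.Dict.empty (fun inner => inner.insert "back" [])
    let d4 := d3.modify date PySem.Dict.empty (fun inner => inner.insert "side" [])
    d4.modify date PySem.Dict.empty (fun inner => inner.insert angle pic)

def makePictureDict (picList : List (List (String × String))) : List (String × List (String × List (String × String))) :=
  ((picList.foldl pvStepA PySem.Dict.empty).items).map (fun p => (p.1, p.2.items))

-- ===== PORT B =====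
-- the seeded inner dict {'front': {}, 'back': {}, 'side': {}}
def pvSeed : PySem.Dict String (List (String × String)) :=
  ((PySem.Dict.empty.insert "front" []).insert "back" []).insert "side" []

-- body of makeInnerDict's loop: if pic['date'] == date: inner[pic['angle']] = pic
def pvInnerStep (date : String) (i : PySem.Dict String (List (String × String)))
    (pic : List (String × String)) : PySem.Dict String (List (String × String)) :=
  if pvKey pic "date" == date then i.insert (pvKey pic "angle") pic else i

-- helper makeInnerDict(picList, date)
def pvInner (picList : List (List (String × String))) (date : String) :
    PySem.Dict String (List (String × String)) :=
  picList.foldl (pvInnerStep date) pvSeed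

-- the 'dates' loop: distinct dates in order of first appearance
def pvDatesStep (ds : List String) (pic : List (String × String)) : List String :=
  if ds.contains (pvKey pic "date") then ds else ds ++ [pvKey pic "date"]

def makePictureDict_alt (picList : List (List (String × String))) : List (String × List (String × List (String × String))) :=
  (((picList.foldl pvDatesStep []).foldl
      (fun r date => r.insert date (pvInner picList date)) PySem.Dict.empty).items).map
    (fun p => (p.1, p.2.items))

-- ===== PRECONDITION & SPEC =====
-- Pre_ excludes pics missing a 'date' or 'angle' key, on which the Python A raises KeyError.
def Pre_makePictureDict (picList : List (List (String × String))) : Prop :=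
  ∀ pic ∈ picList, (pic.any (fun p => p.1 == "date")) = true ∧ (pic.any (fun p => p.1 == "angle")) = true
instance (picList : List (List (String × String))) : Decidable (Pre_makePictureDict picList) := by unfold Pre_makePictureDict; infer_instance

def pvWitness_makePictureDict : (List (List (String × String))) :=
  [[("date", "d1"), ("angle", "front"), ("path", "p1")],
   [("date", "d2"), ("angle", "side"), ("path", "p2")]]

def Spec_makePictureDict (picList : List (List (String × String))) (out : List (String × List (String × List (String × String)))) : Prop := out = makePictureDict_alt picList
instance (picList : List (List (String × String))) (out : List (String × List (String × List (String × String)))) : Decidable (Spec_makePictureDict picList out) := by unfold Spec_makePictureDict; infer_instance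

-- ===== CLAIM (what is proved, stated in full; the proofs are below) =====
def Claim_equal_makePictureDict : Prop := ∀ (picList : List (List (String × String))), Dom_makePictureDict picList → Pre_makePictureDict picList → Spec_makePictureDict picList (makePictureDict picList)

-- ===== LEMMAS AND PROOFS =====

-- proof-side decomposition of A's loop body: a seeding step then an assignment step
def pvStepSeed (d : PySem.Dict String (PySem.Dict String (List (String × String))))
    (pic : List (String × String)) : PySem.Dict String (PySem.Dict String (List (String × String))) :=
  if d.contains (pvKey pic "date") then d else d.insert (pvKey pic "date") pvSeed

def pvStepAsg (d : PySem.Dict String (PySem.Dict String (List (String × String))))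
    (pic : List (String × String)) : PySem.Dict String (PySem.Dict String (List (String × String))) :=
  d.modify (pvKey pic "date") PySem.Dict.empty (fun inner => inner.insert (pvKey pic "angle") pic)

-- inserting at an existing key commutes (as items lists) with inserting at a fresh different key
theorem pv_insert_comm {ν : Type} (d : PySem.Dict String ν) (k k' : String) (v w : ν)
    (hk : d.contains k = true) (hk' : d.contains k' = false) (hne : k' ≠ k) :
    (d.insert k v).insert k' w = (d.insert k' w).insert k v := by
  apply PySem.Dict.ext
  have h1 : (d.insert k v).contains k' = false := by
    rw [PySem.Dict.contains_insert]; simp [hk', hne]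
  have h2 : (d.insert k' w).contains k = true := by
    rw [PySem.Dict.contains_insert]; simp [hk]
  rw [PySem.Dict.items_insert_of_not_contains _ _ h1,
      PySem.Dict.items_insert_of_contains _ _ h2,
      PySem.Dict.items_insert_of_contains _ _ hk,
      PySem.Dict.items_insert_of_not_contains _ _ hk']
  simp [List.map_append, hne]

-- modifying a key just inserted rewrites its value in place
theorem pv_modify_insert {ν : Type} (d : PySem.Dict String ν) (k : String) (v dflt : ν) (f : ν → ν) :
    (d.insert k v).modify k dflt f = d.insert k (f v) := by
  unfold PySem.Dict.modify
  rw [PySem.Dict.getD_insert_self, PySem.Dict.insert_insert_self]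

-- stepAsg at a present date keeps the contains-set unchanged
theorem pv_contains_stepAsg (d : PySem.Dict String (PySem.Dict String (List (String × String))))
    (p : List (String × String)) (hp : d.contains (pvKey p "date") = true) (k : String) :
    (pvStepAsg d p).contains k = d.contains k := by
  unfold pvStepAsg PySem.Dict.modify
  rw [PySem.Dict.contains_insert]
  by_cases h : k = pvKey p "date"
  · subst h; simp [hp]
  · simp [h]

-- stepSeed only grows the contains-set
theorem pv_contains_stepSeed_mono (d : PySem.Dict String (PySem.Dict String (List (String × String))))
    (q : List (String × String)) (k : String) (hk : d.contains k = true) :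
    (pvStepSeed d q).contains k = true := by
  unfold pvStepSeed
  split
  · exact hk
  · rw [PySem.Dict.contains_insert]; simp [hk]

-- after its own seeding step, a pic's date is present
theorem pv_contains_stepSeed_self (d : PySem.Dict String (PySem.Dict String (List (String × String))))
    (p : List (String × String)) : (pvStepSeed d p).contains (pvKey p "date") = true := by
  unfold pvStepSeed
  split
  · assumption
  · exact PySem.Dict.contains_insert_self _ _ _

-- a single seeding step commutes with a pending assignment at an already-present date
theorem pv_seed_asg_comm (d : PySem.Dict String (PySem.Dict String (List (String × String))))
    (p q : List (String × String)) (hp : d.contains (pvKey p "date") = true) :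
    pvStepSeed (pvStepAsg d p) q = pvStepAsg (pvStepSeed d q) p := by
  by_cases hq : d.contains (pvKey q "date") = true
  · unfold pvStepSeed
    rw [pv_contains_stepAsg d p hp]
    simp [hq]
  · simp only [Bool.not_eq_true] at hq
    have hne : pvKey q "date" ≠ pvKey p "date" := by
      intro h; rw [h, hp] at hq; exact Bool.true_eq_false.mp hq
    unfold pvStepSeed
    rw [pv_contains_stepAsg d p hp]
    simp only [hq, Bool.false_eq_true, if_false]
    unfold pvStepAsg PySem.Dict.modify
    simp only [PySem.Dict.getD_insert_of_ne _ pvSeed PySem.Dict.empty (Ne.symm hne)]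
    exact pv_insert_comm d (pvKey p "date") (pvKey q "date") _ pvSeed hp hq hne

-- the whole seeding pass commutes with a pending assignment at an already-present date
theorem pv_foldSeed_asg_comm (l : List (List (String × String)))
    (d : PySem.Dict String (PySem.Dict String (List (String × String))))
    (p : List (String × String)) (hp : d.contains (pvKey p "date") = true) :
    l.foldl pvStepSeed (pvStepAsg d p) = pvStepAsg (l.foldl pvStepSeed d) p := by
  induction l generalizing d with
  | nil => rfl
  | cons q rest ih =>
    simp only [List.foldl_cons]
    rw [pv_seed_asg_comm d p q hp]
    exact ih (pvStepSeed d q) (pv_contains_stepSeed_mono d q _ hp)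

-- A's loop body is one seeding step followed by one assignment step
theorem pv_stepA_eq (d : PySem.Dict String (PySem.Dict String (List (String × String))))
    (p : List (String × String)) : pvStepA d p = pvStepAsg (pvStepSeed d p) p := by
  unfold pvStepA pvStepSeed pvStepAsg
  by_cases h : d.contains (pvKey p "date") = true
  · simp [h]
  · simp only [Bool.not_eq_true] at h
    simp only [h, Bool.false_eq_true, if_false]
    rw [pv_modify_insert, pv_modify_insert, pv_modify_insert, pv_modify_insert, pv_modify_insert]
    rfl

-- A's fold equals a seeding pass then an assignment pass
theorem pv_main (l : List (List (String × String)))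
    (d : PySem.Dict String (PySem.Dict String (List (String × String)))) :
    l.foldl pvStepA d = l.foldl pvStepAsg (l.foldl pvStepSeed d) := by
  induction l generalizing d with
  | nil => rfl
  | cons p rest ih =>
    simp only [List.foldl_cons]
    rw [ih (pvStepA d p), pv_stepA_eq,
        pv_foldSeed_asg_comm rest (pvStepSeed d p) p (pv_contains_stepSeed_self d p)]

-- a dict whose items are ds paired with the seed has keys ds
theorem pv_keys_of_items (d : PySem.Dict String (PySem.Dict String (List (String × String))))
    (ds : List String) (h : d.items = ds.map (fun x => (x, pvSeed))) : d.keys = ds := by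
  simp [PySem.Dict.keys, h, List.map_map, Function.comp_def]

-- the seeding pass's items are exactly B's dates list, each mapped to the seed
theorem pv_seed_items (l : List (List (String × String)))
    (d : PySem.Dict String (PySem.Dict String (List (String × String)))) (ds : List String)
    (h : d.items = ds.map (fun x => (x, pvSeed))) :
    (l.foldl pvStepSeed d).items = (l.foldl pvDatesStep ds).map (fun x => (x, pvSeed)) := by
  induction l generalizing d ds with
  | nil => simp only [List.foldl_nil]; exact h
  | cons p rest ih =>
    simp only [List.foldl_cons]
    have hkeys : d.keys = ds := pv_keys_of_items d ds h
    have hcont : d.contains (pvKey p "date") = ds.contains (pvKey p "date") := by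
      rw [PySem.Dict.contains_eq_decide_mem_keys, hkeys, List.contains_eq_mem]
    unfold pvStepSeed pvDatesStep
    rw [hcont]
    by_cases hm : ds.contains (pvKey p "date") = true
    · simp only [hm, if_true]; exact ih d ds h
    · simp only [Bool.not_eq_true] at hm
      simp only [hm, Bool.false_eq_true, if_false]
      apply ih
      rw [PySem.Dict.items_insert_of_not_contains]
      · simp [h]
      · rw [PySem.Dict.contains_eq_decide_mem_keys, hkeys, ← List.contains_eq_mem, hm]

-- the dates fold only grows its list
theorem pv_dates_mono (l : List (List (String × String))) (ds : List String) (k : String)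
    (hk : k ∈ ds) : k ∈ l.foldl pvDatesStep ds := by
  induction l generalizing ds with
  | nil => exact hk
  | cons p rest ih =>
    apply ih
    unfold pvDatesStep
    split
    · exact hk
    · exact List.mem_append_left _ hk

-- every pic's date ends up in the dates list
theorem pv_dates_complete (l : List (List (String × String))) (ds : List String)
    (p : List (String × String)) (hp : p ∈ l) : pvKey p "date" ∈ l.foldl pvDatesStep ds := by
  induction l generalizing ds with
  | nil => cases hp
  | cons q rest ih =>
    simp only [List.foldl_cons]
    rcases List.mem_cons.mp hp with h | h
    · refine pv_dates_mono rest (pvDatesStep ds q) _ ?_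
      subst h
      unfold pvDatesStep
      by_cases hc : ds.contains (pvKey p "date") = true
      · rw [if_pos hc]; simpa [List.contains_eq_mem] using hc
      · rw [if_neg hc]; exact List.mem_append_right _ (List.mem_singleton.mpr rfl)
    · exact ih _ h

-- the dates list has no duplicates
theorem pv_dates_nodup (l : List (List (String × String))) (ds : List String)
    (h : ds.Nodup) : (l.foldl pvDatesStep ds).Nodup := by
  induction l generalizing ds with
  | nil => exact h
  | cons p rest ih =>
    apply ih
    unfold pvDatesStep
    split
    · exact h
    · next hc =>
      simp only [Bool.not_eq_true, List.contains_eq_mem, decide_eq_false_iff_not] at hc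
      exact List.nodup_append.mpr ⟨h, List.nodup_singleton _,
        fun a ha b hb => by
          rw [List.mem_singleton] at hb
          subst hb
          exact fun he => hc (he ▸ ha)⟩

-- one assignment step acts pointwise on the items list
theorem pv_stepAsg_items (d : PySem.Dict String (PySem.Dict String (List (String × String))))
    (p : List (String × String)) (hnd : d.keys.Nodup) (hp : d.contains (pvKey p "date") = true) :
    (pvStepAsg d p).items = d.items.map (fun q =>
      if q.1 == pvKey p "date" then (q.1, q.2.insert (pvKey p "angle") p) else q) := by
  unfold pvStepAsg PySem.Dict.modify
  rw [PySem.Dict.items_insert_of_contains _ _ hp]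
  apply List.map_congr_left
  rintro ⟨k1, v1⟩ hq
  by_cases h : k1 = pvKey p "date"
  · subst h
    have hv := PySem.Dict.getD_of_mem_items d hq hnd PySem.Dict.empty
    simp [hv]
  · simp [h]

-- the whole assignment pass acts pointwise: each entry's value is its own filtered scan
theorem pv_asg_items (l : List (List (String × String)))
    (d : PySem.Dict String (PySem.Dict String (List (String × String))))
    (hnd : d.keys.Nodup) (hall : ∀ p ∈ l, d.contains (pvKey p "date") = true) :
    (l.foldl pvStepAsg d).items = d.items.map (fun q => (q.1, l.foldl (pvInnerStep q.1) q.2)) := by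
  induction l generalizing d with
  | nil => simp
  | cons p rest ih =>
    simp only [List.foldl_cons]
    have hp := hall p (List.mem_cons_self ..)
    have hnd' : (pvStepAsg d p).keys.Nodup := by
      unfold pvStepAsg PySem.Dict.modify
      rw [PySem.Dict.keys_insert_of_contains _ _ hp]
      exact hnd
    have hall' : ∀ q ∈ rest, (pvStepAsg d p).contains (pvKey q "date") = true := by
      intro q hq
      rw [pv_contains_stepAsg d p hp]
      exact hall q (List.mem_cons_of_mem _ hq)
    rw [ih _ hnd' hall', pv_stepAsg_items d p hnd hp, List.map_map]
    apply List.map_congr_left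
    rintro ⟨k1, v1⟩ _
    simp only [Function.comp_def]
    by_cases h : k1 = pvKey p "date"
    · simp [pvInnerStep, h]
    · have h2 : ¬ pvKey p "date" = k1 := fun he => h he.symm
      simp [pvInnerStep, h, h2]

-- ===== VERDICT (by name: the statement is the Claim_ definition above) =====
theorem makePictureDict_spec : Claim_equal_makePictureDict := by
  intro picList _ _
  unfold Spec_makePictureDict makePictureDict makePictureDict_alt
  rw [pv_main]
  have hseed : (picList.foldl pvStepSeed PySem.Dict.empty).items =
      (picList.foldl pvDatesStep []).map (fun x => (x, pvSeed)) :=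
    pv_seed_items picList PySem.Dict.empty [] (by simp [PySem.Dict.empty])
  have hnddates : (picList.foldl pvDatesStep []).Nodup :=
    pv_dates_nodup picList [] List.nodup_nil
  have hkeys : (picList.foldl pvStepSeed PySem.Dict.empty).keys = picList.foldl pvDatesStep [] :=
    pv_keys_of_items _ _ hseed
  have hnd : (picList.foldl pvStepSeed PySem.Dict.empty).keys.Nodup := by
    rw [hkeys]; exact hnddates
  have hall : ∀ p ∈ picList,
      (picList.foldl pvStepSeed PySem.Dict.empty).contains (pvKey p "date") = true := by
    intro p hp
    rw [PySem.Dict.contains_eq_decide_mem_keys, hkeys]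
    exact decide_eq_true (pv_dates_complete picList [] p hp)
  rw [pv_asg_items picList _ hnd hall, hseed]
  have hfresh := PySem.Dict.items_foldl_insert_fresh (picList.foldl pvDatesStep [])
      (fun a => a) (fun a => pvInner picList a) PySem.Dict.empty
      (by intro a _; simp) (by simpa using hnddates)
  simp only at hfresh
  rw [hfresh]
  simp [pvInner, List.map_map, Function.comp_def, PySem.Dict.empty]
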